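-- pv_equiv track=rewrite | github.com/mandar-karhade/bioassert | bioassert/generator/renderer.py | _render_with_spans
-- ===== SOURCE A (Python) =====
-- class RenderError(RuntimeError):
--     """Raised when renderer preconditions fail (frame/slot mismatch, missing
--     placeholder context, no compatible status phrases). Loud failure is
--     preferred over silent span corruption — see Non-Negotiable #1.
--     """
--
-- def _render_with_spans(
--     template: str, slots: dict[str, str]
-- ) -> tuple[str, dict[str, tuple[int, int]]]:
--     out: list[str] = []
--     spans: dict[str, tuple[int, int]] = {}
--     pos = 0
--     i = 0
--     while i < len(template):
--         ch = template[i]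
--         if ch == "{":
--             end = template.index("}", i)
--             slot_name = template[i + 1 : end]
--             if slot_name not in slots:
--                 raise RenderError(
--                     f"template slot {slot_name!r} missing from slots "
--                     f"{sorted(slots)}"
--                 )
--             value = slots[slot_name]
--             spans[slot_name] = (pos, pos + len(value))
--             out.append(value)
--             pos += len(value)
--             i = end + 1
--         else:
--             out.append(ch)
--             pos += 1
--             i += 1
--     return "".join(out), spans
-- ===== SOURCE B (Python) =====
-- class RenderError(RuntimeError):
--     pass
--
-- def _render_with_spans(template, slots):
--     out = []
--     spans = {}
--     pos = 0
--     i = 0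
--     n = len(template)
--     while i < n:
--         j = template.find("{", i)
--         if j == -1:
--             out.append(template[i:])
--             break
--         if j > i:
--             out.append(template[i:j])
--             pos += j - i
--         end = template.index("}", j)
--         name = template[j + 1 : end]
--         if name not in slots:
--             raise RenderError(
--                 f"template slot {name!r} missing from slots {sorted(slots)}"
--             )
--         value = slots[name]
--         spans[name] = (pos, pos + len(value))
--         out.append(value)
--         pos += len(value)
--         i = end + 1
--     return "".join(out), spans
-- ===== Notes on version B (the rewrite author's own statement) =====
-- stated objective: faster
-- what changed: B drives the loop by placeholder position with str.find, copying each literal run between placeholders as one slice, instead of A's per-character scan that appends one character per iteration; Pre_ excludes inputs on which A raises (unclosed '{' or a slot name missing from slots).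
import Mathlib
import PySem

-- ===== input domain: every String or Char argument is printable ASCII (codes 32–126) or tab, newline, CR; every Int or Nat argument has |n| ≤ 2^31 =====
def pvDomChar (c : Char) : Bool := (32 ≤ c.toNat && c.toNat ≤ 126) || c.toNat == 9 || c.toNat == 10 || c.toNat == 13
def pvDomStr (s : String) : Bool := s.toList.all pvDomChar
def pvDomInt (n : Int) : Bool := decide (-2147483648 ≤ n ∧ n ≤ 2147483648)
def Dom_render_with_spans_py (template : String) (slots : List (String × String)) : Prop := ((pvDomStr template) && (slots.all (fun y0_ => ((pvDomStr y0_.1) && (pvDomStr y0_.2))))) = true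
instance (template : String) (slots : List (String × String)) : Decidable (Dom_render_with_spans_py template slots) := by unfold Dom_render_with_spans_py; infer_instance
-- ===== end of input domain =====

-- B changes the loop shape only: it jumps from placeholder to placeholder with find, copying
-- each literal run as one chunk, instead of A's one-character-per-iteration scan.
-- Equivalence is claimed on Pre_ (the templates on which Python A returns without raising).

-- ===== PORT A =====
-- A's while loop over the character index i, transliterated as structural recursion on the
-- not-yet-consumed character list (i ↦ the dropped prefix); out is accumulated in reverse
-- (Python appends at the end) and "".join(out) is the flatten of its reversal.
-- template.index("}", i) on the remainder is List.findIdx? (· = '}'); where Python raises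
-- (ValueError from .index, RenderError for a missing slot) the port returns ("", []) — those
-- inputs are exactly the ones excluded by Pre_ below.
def pvRenderA (slots : PySem.Dict String String) :
    List Char → List (List Char) → PySem.Dict String (Int × Int) → Int →
    String × List (String × Int × Int)
  | [], out, spans, _ => (String.ofList out.reverse.flatten, spans.items)
  | c :: rest, out, spans, pos =>
    if c = '{' then
      match List.findIdx? (· = '}') rest with
      | none => ("", [])                         -- template.index raises ValueError
      | some k =>
        if slots.contains (String.ofList (rest.take k)) then
          pvRenderA slots (rest.drop (k + 1))
            ((slots.getD (String.ofList (rest.take k)) "").toList :: out)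
            (spans.insert (String.ofList (rest.take k))
              (pos, pos + ((slots.getD (String.ofList (rest.take k)) "").toList.length : Int)))
            (pos + ((slots.getD (String.ofList (rest.take k)) "").toList.length : Int))
        else ("", [])                            -- raise RenderError
    else
      pvRenderA slots rest ([c] :: out) spans (pos + 1)
  termination_by cs => cs.length
  decreasing_by all_goals simp [List.length_drop]

def render_with_spans_py (template : String) (slots : List (String × String)) :
    String × (List (String × Int × Int)) :=
  pvRenderA (PySem.Dict.ofList slots) template.toList [] PySem.Dict.empty 0

-- ===== PORT B =====
-- B's while loop: each iteration finds the next '{' (j), emits the literal run template[i:j]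
-- as ONE chunk, then template.index("}", j) locates the closing brace, the slot value is
-- emitted and its span recorded, and i jumps past the placeholder.  Where Python raises
-- (ValueError from .index, RenderError for a missing slot) the port returns ("", []),
-- outside Pre_ below.
def pvRenderB (slots : PySem.Dict String String) :
    List Char → List (List Char) → PySem.Dict String (Int × Int) → Int →
    String × List (String × Int × Int)
  | [], out, spans, _ => (String.ofList out.reverse.flatten, spans.items)
  | c :: cs, out, spans, pos =>
    match List.findIdx? (· = '{') (c :: cs) with
    | none =>                                    -- j == -1: the whole tail is literal
      (String.ofList (((c :: cs) :: out).reverse.flatten), spans.items)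
    | some j =>
      match List.findIdx? (· = '}') ((c :: cs).drop j) with
      | none => ("", [])                         -- template.index raises ValueError
      | some k =>
        if slots.contains (String.ofList ((((c :: cs).drop j).take k).drop 1)) then
          pvRenderB slots (((c :: cs).drop j).drop (k + 1))
            ((slots.getD (String.ofList ((((c :: cs).drop j).take k).drop 1)) "").toList ::
              (if 0 < j then (c :: cs).take j :: out else out))
            (spans.insert (String.ofList ((((c :: cs).drop j).take k).drop 1))
              (pos + (j : Int), pos + (j : Int) +
                ((slots.getD (String.ofList ((((c :: cs).drop j).take k).drop 1)) "").toList.length : Int)))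
            (pos + (j : Int) +
              ((slots.getD (String.ofList ((((c :: cs).drop j).take k).drop 1)) "").toList.length : Int))
        else ("", [])                            -- raise RenderError
  termination_by cs => cs.length
  decreasing_by simp [List.length_drop]; omega

def render_with_spans_py_alt (template : String) (slots : List (String × String)) :
    String × (List (String × Int × Int)) :=
  pvRenderB (PySem.Dict.ofList slots) template.toList [] PySem.Dict.empty 0

-- ===== PRECONDITION & SPEC =====
-- One-pass well-formedness scan of the template against the slot keys (a two-state DFA:
-- outside / inside a placeholder): every '{' opened outside a placeholder is later closed by
-- a '}', and the name between them is a key of slots.  This is exactly where Python A returns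
-- normally; on its complement A raises ValueError (dangling '{') or RenderError (missing
-- slot) — and B raises the very same exceptions there.
def pvScanOK (slots : PySem.Dict String String) : List Char → Option (List Char) → Bool
  | [], mode => mode.isNone
  | c :: rest, none =>
    if c = '{' then pvScanOK slots rest (some []) else pvScanOK slots rest none
  | c :: rest, some acc =>
    if c = '}' then slots.contains (String.ofList acc) && pvScanOK slots rest none
    else pvScanOK slots rest (some (acc ++ [c]))

def Pre_render_with_spans_py (template : String) (slots : List (String × String)) : Prop :=
  pvScanOK (PySem.Dict.ofList slots) template.toList none = true
instance (template : String) (slots : List (String × String)) : Decidable (Pre_render_with_spans_py template slots) := by unfold Pre_render_with_spans_py; infer_instance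

def pvWitness_render_with_spans_py : String × (List (String × String)) :=
  ("Hi {n}, bye {n}{m}", [("n", "X"), ("m", "")])

def Spec_render_with_spans_py (template : String) (slots : List (String × String)) (out : String × (List (String × Int × Int))) : Prop := out = render_with_spans_py_alt template slots
instance (template : String) (slots : List (String × String)) (out : String × (List (String × Int × Int))) : Decidable (Spec_render_with_spans_py template slots out) := by unfold Spec_render_with_spans_py; infer_instance

-- ===== CLAIM (what is proved, stated in full; the proofs are below) =====
def Claim_equal_render_with_spans_py : Prop := ∀ (template : String) (slots : List (String × String)), Dom_render_with_spans_py template slots → Pre_render_with_spans_py template slots → Spec_render_with_spans_py template slots (render_with_spans_py template slots)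

-- ===== LEMMAS AND PROOFS =====

theorem pv_witness_ok :
    Dom_render_with_spans_py pvWitness_render_with_spans_py.1 pvWitness_render_with_spans_py.2 ∧
    Pre_render_with_spans_py pvWitness_render_with_spans_py.1 pvWitness_render_with_spans_py.2 := by
  decide

-- What a successful findIdx? search gives: the list splits at the found character,
-- which does not occur in the prefix.
theorem pv_findIdx?_decomp (ch : Char) (l : List Char) (j : Nat)
    (h : List.findIdx? (· = ch) l = some j) :
    l.drop j = ch :: l.drop (j + 1) ∧ l = l.take j ++ ch :: l.drop (j + 1) ∧ ch ∉ l.take j := by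
  obtain ⟨hlt, hfi⟩ := List.findIdx?_eq_some_iff_findIdx_eq.mp h
  have hget : l[j]'hlt = ch := by
    have w : List.findIdx (· = ch) l < l.length := by rw [hfi]; exact hlt
    have hp := List.findIdx_getElem (w := w)
    simp only [hfi, decide_eq_true_eq] at hp
    exact hp
  have hdrop : l.drop j = ch :: l.drop (j + 1) := by
    rw [List.drop_eq_getElem_cons hlt, hget]
  refine ⟨hdrop, ?_, ?_⟩
  · conv_lhs => rw [← List.take_append_drop j l]
    rw [hdrop]
  · intro hm
    obtain ⟨i, hi, hv⟩ := List.mem_iff_getElem.mp hm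
    have hij : i < j := by simp at hi; omega
    have hne := List.not_of_lt_findIdx (p := (· = ch)) (xs := l) (i := i) (by omega)
    rw [List.getElem_take] at hv
    simp only [decide_eq_false_iff_not] at hne
    exact hne hv

-- A consumes a brace-free prefix one character at a time, pushing singleton chunks.
theorem pvRenderA_consume (slots : PySem.Dict String String) (pre : List Char)
    (h : '{' ∉ pre) : ∀ (rest : List Char) out spans pos,
    pvRenderA slots (pre ++ rest) out spans pos =
      pvRenderA slots rest (pre.foldl (fun a c => [c] :: a) out) spans (pos + (pre.length : Int)) := by
  induction pre with
  | nil => intro rest out spans pos; simp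
  | cons c pre ih =>
    intro rest out spans pos
    have hc : c ≠ '{' := by simp at h; exact fun e => h.1 e.symm
    have hpre : '{' ∉ pre := by simp at h; exact h.2
    rw [List.cons_append, pvRenderA]
    rw [if_neg (fun e => hc e), ih hpre]
    rw [List.foldl_cons]
    congr 1
    simp only [List.length_cons]
    push_cast
    ring

theorem pv_flatten_push (pre : List Char) : ∀ (out : List (List Char)),
    (pre.foldl (fun a c => [c] :: a) out).reverse.flatten = out.reverse.flatten ++ pre := by
  induction pre with
  | nil => simp
  | cons c pre ih => intro out; rw [List.foldl_cons, ih]; simp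

-- A on an all-literal remainder just copies it.
theorem pvRenderA_tail (slots : PySem.Dict String String) (cs : List Char)
    (h : '{' ∉ cs) (out : List (List Char)) (spans : PySem.Dict String (Int × Int)) (pos : Int) :
    pvRenderA slots cs out spans pos = (String.ofList (out.reverse.flatten ++ cs), spans.items) := by
  have hc := pvRenderA_consume slots cs h [] out spans pos
  rw [List.append_nil] at hc
  rw [hc, pvRenderA, pv_flatten_push]

-- Main loop equivalence: the accumulated chunk lists may differ so long as their
-- concatenations agree; spans and pos coincide exactly.
theorem pv_loop_eq (slots : PySem.Dict String String) :
    ∀ (n : ℕ) (cs : List Char) (out out' : List (List Char)),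
    cs.length ≤ n → out.reverse.flatten = out'.reverse.flatten →
    ∀ spans pos, pvRenderA slots cs out spans pos = pvRenderB slots cs out' spans pos := by
  intro n
  induction n with
  | zero =>
    intro cs out out' hlen hout spans pos
    have : cs = [] := List.eq_nil_of_length_eq_zero (Nat.le_zero.mp hlen)
    subst this
    rw [pvRenderA, pvRenderB, hout]
  | succ n ih =>
    intro cs out out' hlen hout spans pos
    match cs with
    | [] => rw [pvRenderA, pvRenderB, hout]
    | c :: cs' =>
      cases hj : List.findIdx? (· = '{') (c :: cs') with
      | none =>
        have hnb : '{' ∉ c :: cs' := by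
          intro hm
          have := List.findIdx?_eq_none_iff.mp hj '{' hm
          simp at this
        rw [pvRenderB]
        simp only [hj]
        rw [pvRenderA_tail slots _ hnb, hout]
        simp
      | some j =>
        obtain ⟨hdropj, hdecomp, hprenb⟩ := pv_findIdx?_decomp '{' (c :: cs') j hj
        have hjlt : j < (c :: cs').length := (List.findIdx?_eq_some_iff_findIdx_eq.mp hj).1
        have hprelen : ((c :: cs').take j).length = j := by
          simp at hjlt ⊢; omega
        conv_lhs => rw [hdecomp]
        rw [pvRenderA_consume slots _ hprenb, pvRenderA, if_pos rfl, hprelen]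
        rw [pvRenderB]
        simp only [hj, hdropj, List.findIdx?_cons,
          show (decide (('{' : Char) = '}')) = false from rfl, Bool.false_eq_true, if_false]
        cases hk : List.findIdx? (· = '}') ((c :: cs').drop (j + 1)) with
        | none => simp
        | some k =>
          simp only [Option.map_some, List.take_succ_cons, List.drop_succ_cons,
            List.drop_zero]
          by_cases hcont :
              slots.contains (String.ofList ((cs'.drop j).take k)) = true
          · rw [if_pos hcont, if_pos hcont]
            apply ih
            · simp only [List.length_drop]
              simp only [List.length_cons] at hlen
              omega
            · simp only [List.reverse_cons, List.flatten_append, List.flatten_cons,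
                List.flatten_nil, List.append_nil]
              rw [pv_flatten_push]
              by_cases h0 : 0 < j
              · rw [if_pos h0]; simp [hout]
              · have hj0 : j = 0 := by omega
                have ht : (c :: cs').take j = [] := by rw [hj0]; simp
                rw [if_neg h0, ht, hout]
                simp
          · rw [if_neg hcont, if_neg hcont]

-- ===== VERDICT (by name: the statement is the Claim_ definition above) =====
theorem render_with_spans_py_spec : Claim_equal_render_with_spans_py := by
  intro template slots _ _
  unfold Spec_render_with_spans_py render_with_spans_py render_with_spans_py_alt
  exact pv_loop_eq _ template.toList.length template.toList [] [] le_rfl rfl _ _
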